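-- pv_equiv track=rewrite | github.com/rpep/pyfmm | pyfmm/indexing.py | IndexFromCell
-- ===== SOURCE A (Python) =====
-- def IndexFromCell(X, l):
--     """
--     IndexFromCell(X l)
--
--     This function returns the Morton Index
--     given the cell indices.
--     """
--     assert isinstance(l, int), "l must be an integer"
--     assert len(X) == 3, "X must be a length three array of integers"
--     for i in X:
--         assert i == int(i), "X must be a length three array of integers"
--
--     I  = 0
--     for i in range(l):
--         I += (X[2] & 1) << (3*i)
--         I += (X[1] & 1) << (3*i + 1)
--         I += (X[0] & 1) << (3*i + 2)
--         X = [X[i] >> 1 for i in range(3)]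
--     return I
-- ===== SOURCE B (Python) =====
-- def IndexFromCell(X, l):
--     """
--     IndexFromCell(X l)
--
--     This function returns the Morton Index
--     given the cell indices.
--     """
--     assert isinstance(l, int), "l must be an integer"
--     assert len(X) == 3, "X must be a length three array of integers"
--     for i in X:
--         assert i == int(i), "X must be a length three array of integers"
--
--     def spread(x):
--         # Horner scheme from the most significant of the l bits down:
--         # places bit j of x at position 3*j (every third bit).
--         s = 0
--         for j in range(l - 1, -1, -1):
--             s = 8 * s + ((x >> j) & 1)
--         return s
--
--     return spread(X[2]) + 2 * spread(X[1]) + 4 * spread(X[0])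
-- ===== Notes on version B (the rewrite author's own statement) =====
-- stated objective: alternative
-- what changed: Replaced the bit-major loop that shifts the whole X list each step by a per-coordinate Horner scheme: a helper spreads the low l bits of one coordinate into every third position by folding from the most significant bit down (s = 8*s + bit), and the three spread values are combined with fixed weights 1/2/4; no interleaved bit positions 3*i+off are ever computed and no shifted copies of X are built.
import Mathlib
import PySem

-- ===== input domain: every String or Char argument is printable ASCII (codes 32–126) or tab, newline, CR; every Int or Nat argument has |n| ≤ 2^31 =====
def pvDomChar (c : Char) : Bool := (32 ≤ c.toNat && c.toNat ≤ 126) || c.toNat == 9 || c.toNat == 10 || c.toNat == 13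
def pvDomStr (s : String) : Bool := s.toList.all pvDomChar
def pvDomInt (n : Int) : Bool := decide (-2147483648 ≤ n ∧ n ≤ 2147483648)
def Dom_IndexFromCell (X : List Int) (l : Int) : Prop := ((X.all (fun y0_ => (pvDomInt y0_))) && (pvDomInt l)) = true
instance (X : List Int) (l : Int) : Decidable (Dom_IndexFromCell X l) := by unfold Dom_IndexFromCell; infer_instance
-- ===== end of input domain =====

-- B spreads each coordinate's low l bits into every third position by a Horner scheme
-- from the top bit down and combines the three spreads with weights 1/2/4, instead of
-- A's bit-major loop that rebuilds a right-shifted copy of X every iteration.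

-- ===== PORT A =====
-- A's loop: bit-major; the fold state carries I and the three progressively shifted coordinates.
def IndexFromCell (X : List Int) (l : Int) : Int :=
  match X with
  | [x0, x1, x2] =>
      ((PySem.List.pyRange 0 l 1).foldl
        (fun (s : Int × Int × Int × Int) (i : Int) =>
          let I1 := s.1 + (PySem.Int.band s.2.2.2 1) <<< (3 * i).toNat
          let I2 := I1 + (PySem.Int.band s.2.2.1 1) <<< (3 * i + 1).toNat
          let I3 := I2 + (PySem.Int.band s.2.1 1) <<< (3 * i + 2).toNat
          (I3, s.2.1 >>> (1 : Nat), s.2.2.1 >>> (1 : Nat), s.2.2.2 >>> (1 : Nat)))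
        (0, x0, x1, x2)).1
  | _ => 0  -- the assert 'len(X) == 3' raises in Python: excluded by Pre_

-- ===== PORT B =====
-- B's helper spread(x): Horner fold over range(l-1, -1, -1), s = 8*s + ((x >> j) & 1).
def pvSpread (x : Int) (l : Int) : Int :=
  (PySem.List.pyRange (l - 1) (-1) (-1)).foldl
    (fun (s : Int) (j : Int) => 8 * s + PySem.Int.band (x >>> j.toNat) 1) 0

def IndexFromCell_alt (X : List Int) (l : Int) : Int :=
  if X.length = 3 then
    pvSpread (PySem.List.pyGetD X 2 0) l + 2 * pvSpread (PySem.List.pyGetD X 1 0) l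
      + 4 * pvSpread (PySem.List.pyGetD X 0 0) l
  else 0  -- the assert 'len(X) == 3' raises in Python: excluded by Pre_

-- ===== PRECONDITION & SPEC =====
-- Pre_ excludes exactly the inputs where A's assert 'len(X) == 3' raises AssertionError.
def Pre_IndexFromCell (X : List Int) (l : Int) : Prop := X.length = 3
instance (X : List Int) (l : Int) : Decidable (Pre_IndexFromCell X l) := by unfold Pre_IndexFromCell; infer_instance
def pvWitness_IndexFromCell : List Int × Int := ([3, -2, 5], 4)

def Spec_IndexFromCell (X : List Int) (l : Int) (out : Int) : Prop := out = IndexFromCell_alt X l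
instance (X : List Int) (l : Int) (out : Int) : Decidable (Spec_IndexFromCell X l out) := by unfold Spec_IndexFromCell; infer_instance

-- ===== CLAIM (what is proved, stated in full; the proofs are below) =====
def Claim_equal_IndexFromCell : Prop := ∀ (X : List Int) (l : Int), Dom_IndexFromCell X l → Pre_IndexFromCell X l → Spec_IndexFromCell X l (IndexFromCell X l)

-- ===== LEMMAS AND PROOFS =====

-- bit j of x, weighted by 8^j, summed over j < n
def pvS (x : Int) (n : Nat) : Int :=
  ((List.range n).map (fun (j : Nat) => PySem.Int.band (x >>> j) 1 * 8 ^ j)).sum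

-- bits j < n of x, placed at the interleaved positions 3*(k+j)+off (A's shape)
def pvSB (x : Int) (off k n : Nat) : Int :=
  ((List.range n).map (fun (j : Nat) => (PySem.Int.band (x >>> j) 1) <<< ((3 * (k + j) + off : Nat)))).sum

theorem pvSB_succ (x : Int) (off k n : Nat) :
    pvSB x off k (n + 1)
      = (PySem.Int.band x 1) <<< ((3 * k + off : Nat)) + pvSB (x >>> (1 : Nat)) off (k + 1) n := by
  unfold pvSB
  rw [List.range_succ_eq_map, List.map_cons, List.map_map, List.sum_cons]
  congr 1
  · simp
  apply congrArg List.sum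
  apply List.map_congr_left
  intro j hj
  simp only [Function.comp, Nat.succ_eq_add_one]
  rw [show j + 1 = 1 + j by omega, Int.shiftRight_add]
  have he : 3 * (k + (1 + j)) + off = 3 * (k + 1 + j) + off := by omega
  rw [he]

-- A's loop, started at index k from an arbitrary state, written as three bit sums
theorem pvLoopA (n : Nat) : ∀ (k : Nat) (I a b c : Int),
    ((List.range' k n).foldl
      (fun (s : Int × Int × Int × Int) (j : Nat) =>
        (s.1 + (PySem.Int.band s.2.2.2 1) <<< ((3 * j : Nat))
             + (PySem.Int.band s.2.2.1 1) <<< ((3 * j + 1 : Nat))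
             + (PySem.Int.band s.2.1 1) <<< ((3 * j + 2 : Nat)),
         s.2.1 >>> (1 : Nat), s.2.2.1 >>> (1 : Nat), s.2.2.2 >>> (1 : Nat)))
      (I, a, b, c)).1
    = I + pvSB c 0 k n + pvSB b 1 k n + pvSB a 2 k n := by
  induction n with
  | zero => intro k I a b c; simp [pvSB]
  | succ n ih =>
    intro k I a b c
    rw [List.range'_succ, List.foldl_cons, ih]
    rw [pvSB_succ c 0, pvSB_succ b 1, pvSB_succ a 2]
    ring_nf

-- A's placed sum at k = 0 is the plain 8^j sum scaled by 2^off
theorem pvSB_eq (x : Int) (off n : Nat) : pvSB x off 0 n = pvS x n * 2 ^ off := by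
  unfold pvSB pvS
  rw [← List.sum_map_mul_right]
  apply congrArg List.sum
  apply List.map_congr_left
  intro j hj
  rw [Int.shiftLeft_eq]
  have he : 3 * (0 + j) + off = 3 * j + off := by omega
  rw [he, pow_add, pow_mul]
  norm_num
  ring

-- B's Horner fold over the descending bit list, from any accumulator
theorem pvLoopB (n : Nat) : ∀ (s x : Int),
    ((List.range n).map (fun (k : Nat) => (n : Int) - 1 - k)).foldl
      (fun (s : Int) (j : Int) => 8 * s + PySem.Int.band (x >>> j.toNat) 1) s
    = s * 8 ^ n + pvS x n := by
  induction n with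
  | zero => intro s x; simp [pvS]
  | succ n ih =>
    intro s x
    rw [List.range_succ_eq_map, List.map_cons, List.map_map, List.foldl_cons]
    have hf : ((fun (k : Nat) => ((n + 1 : Nat) : Int) - 1 - k) ∘ Nat.succ)
        = fun (k : Nat) => (n : Int) - 1 - k := by
      funext k; simp [Function.comp, Nat.succ_eq_add_one]; ring
    have hh : (((n + 1 : Nat) : Int) - 1 - ((0 : Nat) : Int)).toNat = n := by omega
    rw [hf, hh, ih]
    have hS : pvS x (n + 1) = pvS x n + PySem.Int.band (x >>> n) 1 * 8 ^ n := by
      unfold pvS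
      rw [List.range_succ, List.map_append, List.sum_append]
      simp
    rw [hS]
    ring

theorem pvSpread_eq (x : Int) (l : Int) : pvSpread x l = pvS x l.toNat := by
  unfold pvSpread
  rw [PySem.List.pyRange_neg_one]
  have h1 : (l - 1 - (-1)).toNat = l.toNat := by omega
  rw [h1]
  rcases (by omega : 0 ≤ l ∨ l < 0) with hl | hl
  · obtain ⟨n, rfl⟩ : ∃ n : Nat, l = (n : Int) := ⟨l.toNat, (Int.toNat_of_nonneg hl).symm⟩
    rw [Int.toNat_natCast]
    have := pvLoopB n 0 x
    simpa using this
  · have h0 : l.toNat = 0 := by omega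
    rw [h0]
    simp [pvS]

-- ===== VERDICT (by name: the statement is the Claim_ definition above) =====
theorem IndexFromCell_spec : Claim_equal_IndexFromCell := by
  intro X l _hD hP
  unfold Spec_IndexFromCell
  obtain ⟨x0, x1, x2, rfl⟩ : ∃ a b c, X = [a, b, c] := by
    match X, hP with
    | [a, b, c], _ => exact ⟨a, b, c, rfl⟩
  unfold IndexFromCell IndexFromCell_alt
  rw [if_pos (show ([x0, x1, x2] : List Int).length = 3 from rfl)]
  have g2 : PySem.List.pyGetD [x0, x1, x2] 2 0 = x2 := rfl
  have g1 : PySem.List.pyGetD [x0, x1, x2] 1 0 = x1 := rfl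
  have g0 : PySem.List.pyGetD [x0, x1, x2] 0 0 = x0 := rfl
  rw [g0, g1, g2, pvSpread_eq, pvSpread_eq, pvSpread_eq]
  rw [PySem.List.pyRange_one]
  simp only [List.foldl_map, zero_add]
  have h1 : ∀ j : Nat, (3 * (j : Int)).toNat = 3 * j := fun j => by omega
  have h2 : ∀ j : Nat, (3 * (j : Int) + 1).toNat = 3 * j + 1 := fun j => by omega
  have h3 : ∀ j : Nat, (3 * (j : Int) + 2).toNat = 3 * j + 2 := fun j => by omega
  simp only [h1, h2, h3, Int.sub_zero]
  rw [List.range_eq_range', pvLoopA]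
  rw [pvSB_eq, pvSB_eq, pvSB_eq]
  norm_num
  ring
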